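-- pv_equiv track=rewrite | github.com/duckduckdoof/NSA | extended_transformations/utils.py | collect_positions_by_color
-- ===== SOURCE A (Python) =====
-- def collect_positions_by_color(grid, colors):
--     positions_by_color = {}
--     for color in colors:
--         positions = [
--             (i, j)
--             for i, row in enumerate(grid)
--             for j, val in enumerate(row)
--             if val == color
--         ]
--         positions_by_color[color] = positions
--     return positions_by_color
-- ===== SOURCE B (Python) =====
-- def collect_positions_by_color(grid, colors):
--     # One pass over the grid: pre-seed one empty list per requested color,
--     # then append each cell position to its color's list.
--     positions_by_color = {color: [] for color in colors}
--     for i, row in enumerate(grid):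
--         for j, val in enumerate(row):
--             if val in positions_by_color:
--                 positions_by_color[val].append((i, j))
--     return positions_by_color
-- ===== Notes on version B (the rewrite author's own statement) =====
-- stated objective: faster
-- what changed: Instead of rescanning the whole grid once per color, B seeds an empty list per color and makes a single pass over the grid, appending each matching cell to its color's list.
import Mathlib
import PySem

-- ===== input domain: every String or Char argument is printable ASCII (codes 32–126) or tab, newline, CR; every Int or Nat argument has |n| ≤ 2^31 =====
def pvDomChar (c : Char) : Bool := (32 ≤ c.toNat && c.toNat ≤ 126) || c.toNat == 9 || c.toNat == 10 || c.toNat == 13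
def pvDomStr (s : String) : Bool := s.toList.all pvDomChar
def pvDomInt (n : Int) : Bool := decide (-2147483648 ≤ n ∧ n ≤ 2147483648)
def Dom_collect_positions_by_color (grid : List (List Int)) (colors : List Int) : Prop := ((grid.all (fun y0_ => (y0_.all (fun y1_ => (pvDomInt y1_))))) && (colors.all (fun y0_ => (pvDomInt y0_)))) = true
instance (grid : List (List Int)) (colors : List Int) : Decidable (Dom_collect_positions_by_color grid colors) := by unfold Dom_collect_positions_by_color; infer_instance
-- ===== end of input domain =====

-- B makes a single pass over the grid (per-color lists seeded up front) instead of
-- rescanning the whole grid once per color; same return value everywhere.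

-- ===== PORT A =====
-- the list comprehension [(i, j) for i, row in enumerate(grid) for j, val in enumerate(row) if val == color]
def pvPositionsOf (grid : List (List Int)) (color : Int) : List (Int × Int) :=
  (PySem.List.enumerate grid 0).flatMap (fun p =>
    ((PySem.List.enumerate p.2 0).filter (fun q => q.2 == color)).map (fun q => (p.1, q.1)))

def collect_positions_by_color (grid : List (List Int)) (colors : List Int) : List (Int × List (Int × Int)) :=
  (colors.foldl (fun d color => d.insert color (pvPositionsOf grid color))
    (PySem.Dict.empty : PySem.Dict Int (List (Int × Int)))).items

-- ===== PORT B =====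
-- inner loop body: if val in positions_by_color: positions_by_color[val].append((i, j))
def pvBStep (i : Int) (d : PySem.Dict Int (List (Int × Int))) (q : Int × Int) :
    PySem.Dict Int (List (Int × Int)) :=
  if d.contains q.2 then d.modify q.2 [] (· ++ [(i, q.1)]) else d

def collect_positions_by_color_alt (grid : List (List Int)) (colors : List Int) : List (Int × List (Int × Int)) :=
  let d0 := colors.foldl (fun d color => d.insert color ([] : List (Int × Int)))
    (PySem.Dict.empty : PySem.Dict Int (List (Int × Int)))
  ((PySem.List.enumerate grid 0).foldl (fun d p =>
      (PySem.List.enumerate p.2 0).foldl (pvBStep p.1) d) d0).items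

-- ===== PRECONDITION & SPEC =====
def Spec_collect_positions_by_color (grid : List (List Int)) (colors : List Int) (out : List (Int × List (Int × Int))) : Prop := out = collect_positions_by_color_alt grid colors
instance (grid : List (List Int)) (colors : List Int) (out : List (Int × List (Int × Int))) : Decidable (Spec_collect_positions_by_color grid colors out) := by unfold Spec_collect_positions_by_color; infer_instance

-- ===== CLAIM (what is proved, stated in full; the proofs are below) =====
def Claim_equal_collect_positions_by_color : Prop := ∀ (grid : List (List Int)) (colors : List Int), Dom_collect_positions_by_color grid colors → Spec_collect_positions_by_color grid colors (collect_positions_by_color grid colors)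

-- ===== LEMMAS AND PROOFS =====

-- B's inner loop never changes the key list.
theorem pvB_keys_row (l : List (Int × Int)) (i : Int) (d : PySem.Dict Int (List (Int × Int))) :
    (l.foldl (pvBStep i) d).keys = d.keys := by
  induction l generalizing d with
  | nil => rfl
  | cons q l ih =>
      simp only [List.foldl_cons, pvBStep]
      by_cases h : d.contains q.2 = true
      · rw [if_pos h, ih, PySem.Dict.keys_modify, PySem.Dict.keys_insert_of_contains]
        exact h
      · rw [if_neg h, ih]

theorem pvB_keys (rows : List (Int × List Int)) (d : PySem.Dict Int (List (Int × Int))) :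
    (rows.foldl (fun d p => (PySem.List.enumerate p.2 0).foldl (pvBStep p.1) d) d).keys = d.keys := by
  induction rows generalizing d with
  | nil => rfl
  | cons r rows ih => simp only [List.foldl_cons]; rw [ih, pvB_keys_row]

-- B's inner loop appends, to the list of a present color c, the matching cells of this row.
theorem pvB_getD_row (l : List (Int × Int)) (i : Int) (c : Int)
    (d : PySem.Dict Int (List (Int × Int))) (hc : d.contains c = true) :
    (l.foldl (pvBStep i) d).getD c [] =
      d.getD c [] ++ (l.filter (fun q => q.2 == c)).map (fun q => (i, q.1)) := by
  induction l generalizing d with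
  | nil => simp
  | cons q l ih =>
      simp only [List.foldl_cons, List.filter_cons, pvBStep]
      by_cases hqc : q.2 = c
      · subst hqc
        rw [if_pos hc, ih _ (by rw [PySem.Dict.contains_modify]; simp),
          PySem.Dict.getD_modify_self]
        simp
      · rw [if_neg (show ¬((q.2 == c) = true) by simpa using hqc)]
        by_cases h : d.contains q.2 = true
        · rw [if_pos h, ih _ (by rw [PySem.Dict.contains_modify]; simp [hc]),
            PySem.Dict.getD_modify_of_ne _ _ _ (fun h => hqc h.symm)]
        · rw [if_neg h, ih _ hc]

theorem pvB_getD (rows : List (Int × List Int)) (c : Int)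
    (d : PySem.Dict Int (List (Int × Int))) (hc : d.contains c = true) :
    (rows.foldl (fun d p => (PySem.List.enumerate p.2 0).foldl (pvBStep p.1) d) d).getD c [] =
      d.getD c [] ++ rows.flatMap (fun p =>
        ((PySem.List.enumerate p.2 0).filter (fun q => q.2 == c)).map (fun q => (p.1, q.1))) := by
  induction rows generalizing d with
  | nil => simp
  | cons r rows ih =>
      simp only [List.foldl_cons, List.flatMap_cons]
      rw [ih _ (by
            rw [PySem.Dict.contains_eq_decide_mem_keys] at *
            rw [pvB_keys_row]; exact hc),
        pvB_getD_row _ _ _ _ hc, List.append_assoc]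

-- A's dict: lookup of a color in `colors` gives its position list.
theorem pvA_getD (colors : List Int) (c : Int) (v : Int → List (Int × Int))
    (d : PySem.Dict Int (List (Int × Int))) :
    (colors.foldl (fun d color => d.insert color (v color)) d).getD c [] =
      if c ∈ colors then v c else d.getD c [] := by
  induction colors generalizing d with
  | nil => simp
  | cons a colors ih =>
      simp only [List.foldl_cons, ih, List.mem_cons]
      by_cases h : c ∈ colors
      · simp [h]
      · by_cases hca : c = a
        · subst hca; simp [h]
        · simp [h, hca, PySem.Dict.getD_insert]

-- ===== VERDICT (by name: the statement is the Claim_ definition above) =====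
theorem collect_positions_by_color_spec : Claim_equal_collect_positions_by_color := by
  intro grid colors _
  unfold Spec_collect_positions_by_color collect_positions_by_color collect_positions_by_color_alt
  have hAkeys := PySem.Dict.keys_foldl_insert colors (fun _ color => pvPositionsOf grid color)
    (PySem.Dict.empty : PySem.Dict Int (List (Int × Int)))
  have hBkeys0 := PySem.Dict.keys_foldl_insert colors (fun _ _ => ([] : List (Int × Int)))
    (PySem.Dict.empty : PySem.Dict Int (List (Int × Int)))
  have hAnd := PySem.Dict.nodup_keys_foldl_insert colors (fun _ color => pvPositionsOf grid color)
    (PySem.Dict.empty : PySem.Dict Int (List (Int × Int))) (by simp)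
  have hBnd0 := PySem.Dict.nodup_keys_foldl_insert colors (fun _ _ => ([] : List (Int × Int)))
    (PySem.Dict.empty : PySem.Dict Int (List (Int × Int))) (by simp)
  rw [PySem.Dict.items_eq_map_keys _ hAnd [],
    PySem.Dict.items_eq_map_keys _ (by rw [pvB_keys]; exact hBnd0) []]
  rw [pvB_keys, hAkeys, hBkeys0]
  apply List.map_congr_left
  intro k hk
  have hkc : k ∈ colors := by
    have := (PySem.Set.mem_update (PySem.Dict.empty : PySem.Dict Int (List (Int × Int))).keys colors k).1 hk
    simpa using this
  have hcont : (colors.foldl (fun d color => d.insert color ([] : List (Int × Int)))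
      (PySem.Dict.empty : PySem.Dict Int (List (Int × Int)))).contains k = true := by
    rw [PySem.Dict.contains_eq_decide_mem_keys, hBkeys0]
    simpa using hk
  rw [pvA_getD, pvB_getD _ _ _ hcont, pvA_getD]
  simp [hkc, pvPositionsOf]
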